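-- pv_equiv track=rewrite | github.com/osh-finch/my-work | Hector Finch Analytics/src/data_processing.py | assign_size
-- ===== SOURCE A (Python) =====
-- def assign_size(before_slash: str):
--     """
--     Derive size from the text before the first slash.
--     Checks for a known suffix and returns (size, remaining_text).
--     """
--     suffix_size_mapping = {
--         'XS': 'Extra Small',
--         'XL': 'Extra Large',
--         'S': 'Small',
--         'M': 'Medium',
--         'L': 'Large',
--         'LE': 'Large',
--         'GT': 'Giant'
--     }
--     # Check longer suffixes first to avoid partial matches (e.g. "XL" vs. "L")
--     for suffix, size in sorted(suffix_size_mapping.items(), key=lambda x: len(x[0]), reverse=True):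
--         if before_slash.endswith(suffix):
--             return size, before_slash[:-len(suffix)].strip()
--     return None, before_slash
-- ===== SOURCE B (Python) =====
-- def assign_size(before_slash: str):
--     """
--     Derive size from the text before the first slash.
--     Checks for a known suffix and returns (size, remaining_text).
--     """
--     two_char = {'XS': 'Extra Small', 'XL': 'Extra Large', 'LE': 'Large', 'GT': 'Giant'}
--     one_char = {'S': 'Small', 'M': 'Medium', 'L': 'Large'}
--     size = two_char.get(before_slash[-2:])
--     if size is not None:
--         return size, before_slash[:-2].strip()
--     size = one_char.get(before_slash[-1:])
--     if size is not None:
--         return size, before_slash[:-1].strip()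
--     return None, before_slash
-- ===== Notes on version B (the rewrite author's own statement) =====
-- stated objective: idiomatic
-- what changed: B replaces A's sort-the-dict-and-scan-endswith loop with two fixed-length suffix buckets (a 2-char dict and a 1-char dict) looked up directly on the string's tail slice.
import Mathlib
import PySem

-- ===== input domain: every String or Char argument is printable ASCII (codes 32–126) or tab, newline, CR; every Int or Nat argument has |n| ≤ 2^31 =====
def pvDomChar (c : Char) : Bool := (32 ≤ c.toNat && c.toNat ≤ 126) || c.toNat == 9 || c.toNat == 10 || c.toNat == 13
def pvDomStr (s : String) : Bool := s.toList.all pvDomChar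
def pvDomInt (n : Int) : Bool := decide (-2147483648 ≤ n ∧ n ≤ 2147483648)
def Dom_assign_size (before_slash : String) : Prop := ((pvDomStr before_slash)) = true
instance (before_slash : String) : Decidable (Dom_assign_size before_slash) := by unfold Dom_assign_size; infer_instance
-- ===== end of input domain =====

-- B replaces A's sorted endswith scan with two fixed-length suffix-bucket dict lookups; same results, more idiomatic.

-- ===== PORT A =====
-- the 'for suffix, size in sorted(...)' loop with its early return
def assignSizeLoop (before_slash : String) : List (String × String) → Option String × String
  | [] => (none, before_slash)
  | (suffix, size) :: rest =>
    if PySem.Str.endswith before_slash suffix then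
      (some size, PySem.Str.strip (PySem.Str.slice before_slash none (some (-(PySem.Str.len suffix)))))
    else assignSizeLoop before_slash rest

def assign_size (before_slash : String) : Option String × String :=
  let suffix_size_mapping : PySem.Dict String String :=
    PySem.Dict.ofList [("XS", "Extra Small"), ("XL", "Extra Large"), ("S", "Small"),
                       ("M", "Medium"), ("L", "Large"), ("LE", "Large"), ("GT", "Giant")]
  assignSizeLoop before_slash
    (PySem.List.sorted suffix_size_mapping.items (fun x => PySem.Str.len x.1) true)

-- ===== PORT B =====
def assign_size_alt (before_slash : String) : Option String × String :=
  let two_char : PySem.Dict String String :=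
    PySem.Dict.ofList [("XS", "Extra Small"), ("XL", "Extra Large"), ("LE", "Large"), ("GT", "Giant")]
  let one_char : PySem.Dict String String :=
    PySem.Dict.ofList [("S", "Small"), ("M", "Medium"), ("L", "Large")]
  match two_char.get? (PySem.Str.slice before_slash (some (-2)) none) with
  | some size => (size, PySem.Str.strip (PySem.Str.slice before_slash none (some (-2))))
  | none =>
    match one_char.get? (PySem.Str.slice before_slash (some (-1)) none) with
    | some size => (size, PySem.Str.strip (PySem.Str.slice before_slash none (some (-1))))
    | none => (none, before_slash)

-- ===== PRECONDITION & SPEC =====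
def Spec_assign_size (before_slash : String) (out : Option String × String) : Prop := out = assign_size_alt before_slash
instance (before_slash : String) (out : Option String × String) : Decidable (Spec_assign_size before_slash out) := by unfold Spec_assign_size; infer_instance

-- ===== CLAIM (what is proved, stated in full; the proofs are below) =====
def Claim_equal_assign_size : Prop := ∀ (before_slash : String), Dom_assign_size before_slash → Spec_assign_size before_slash (assign_size before_slash)

-- ===== LEMMAS AND PROOFS =====

-- s.endswith(p) is a comparison of the last |p| characters with p
theorem endswith_eq_drop (cs p : List Char) :
    PySem.Chars.endswith cs p = (List.drop (cs.length - p.length) cs == p) := by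
  rw [Bool.eq_iff_iff, PySem.Chars.endswith_iff, beq_iff_eq, List.suffix_iff_eq_drop, eq_comm]

-- a tail slice s[-k:] (k > 0) is the drop of all but the last k characters
theorem slice_neg_toList (s : String) (k : Nat) (hk : 0 < k) :
    (PySem.Str.slice s (some (-(k : Int))) none).toList = List.drop (s.toList.length - k) s.toList := by
  simp [PySem.List.slice_some_none, PySem.List.clampIdx_neg_natCast _ k hk]

-- ===== VERDICT (by name: the statement is the Claim_ definition above) =====
theorem assign_size_spec : Claim_equal_assign_size := by
  intro s _
  unfold Spec_assign_size assign_size assign_size_alt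
  show assignSizeLoop s _ = _
  rw [show PySem.List.sorted (PySem.Dict.ofList [("XS", "Extra Small"), ("XL", "Extra Large"), ("S", "Small"),
                       ("M", "Medium"), ("L", "Large"), ("LE", "Large"), ("GT", "Giant")]).items (fun x => PySem.Str.len x.1) true
  = [("XS", "Extra Small"), ("XL", "Extra Large"), ("LE", "Large"), ("GT", "Giant"),
     ("S", "Small"), ("M", "Medium"), ("L", "Large")] from by decide]
  have hlen2 : ∀ p : String, p.toList.length = 2 →
      PySem.Str.endswith s p = (p == PySem.Str.slice s (some (-2)) none) := by
    intro p hp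
    rw [Bool.eq_iff_iff, beq_iff_eq, ← String.toList_inj,
      show ((-2:Int)) = -((2:Nat):Int) from by norm_num,
      slice_neg_toList s 2 (by omega), ← hp, PySem.Str.endswith_eq,
      endswith_eq_drop, beq_iff_eq, eq_comm]
  have hlen1 : ∀ p : String, p.toList.length = 1 →
      PySem.Str.endswith s p = (p == PySem.Str.slice s (some (-1)) none) := by
    intro p hp
    rw [Bool.eq_iff_iff, beq_iff_eq, ← String.toList_inj,
      show ((-1:Int)) = -((1:Nat):Int) from by norm_num,
      slice_neg_toList s 1 (by omega), ← hp, PySem.Str.endswith_eq,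
      endswith_eq_drop, beq_iff_eq, eq_comm]
  have hget2 : ∀ t : String,
      (PySem.Dict.ofList [("XS", "Extra Small"), ("XL", "Extra Large"), ("LE", "Large"), ("GT", "Giant")] : PySem.Dict String String).get? t
      = if "XS" == t then some "Extra Small" else if "XL" == t then some "Extra Large"
        else if "LE" == t then some "Large" else if "GT" == t then some "Giant" else none := by
    intro t
    rw [show (PySem.Dict.ofList [("XS", "Extra Small"), ("XL", "Extra Large"), ("LE", "Large"), ("GT", "Giant")] : PySem.Dict String String)
        = PySem.Dict.mk [("XS", "Extra Small"), ("XL", "Extra Large"), ("LE", "Large"), ("GT", "Giant")] from by decide]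
    simp only [PySem.Dict.get?]
    by_cases h1 : ("XS":String) = t <;> by_cases h2 : ("XL":String) = t <;>
      by_cases h3 : ("LE":String) = t <;> by_cases h4 : ("GT":String) = t <;>
      simp_all [List.find?, Bool.beq_eq_decide_eq]
  have hget1 : ∀ t : String,
      (PySem.Dict.ofList [("S", "Small"), ("M", "Medium"), ("L", "Large")] : PySem.Dict String String).get? t
      = if "S" == t then some "Small" else if "M" == t then some "Medium"
        else if "L" == t then some "Large" else none := by
    intro t
    rw [show (PySem.Dict.ofList [("S", "Small"), ("M", "Medium"), ("L", "Large")] : PySem.Dict String String)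
        = PySem.Dict.mk [("S", "Small"), ("M", "Medium"), ("L", "Large")] from by decide]
    simp only [PySem.Dict.get?]
    by_cases h1 : ("S":String) = t <;> by_cases h2 : ("M":String) = t <;>
      by_cases h3 : ("L":String) = t <;> simp_all [List.find?, Bool.beq_eq_decide_eq]
  simp only [assignSizeLoop, hget2, hget1,
    hlen2 "XS" (by decide), hlen2 "XL" (by decide), hlen2 "LE" (by decide), hlen2 "GT" (by decide),
    hlen1 "S" (by decide), hlen1 "M" (by decide), hlen1 "L" (by decide),
    show -PySem.Str.len "XS" = (-2 : Int) from by decide,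
    show -PySem.Str.len "XL" = (-2 : Int) from by decide, show -PySem.Str.len "LE" = (-2 : Int) from by decide,
    show -PySem.Str.len "GT" = (-2 : Int) from by decide, show -PySem.Str.len "S" = (-1 : Int) from by decide,
    show -PySem.Str.len "M" = (-1 : Int) from by decide, show -PySem.Str.len "L" = (-1 : Int) from by decide]
  split_ifs <;> rfl
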